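-- pv_equiv track=rewrite | github.com/actions-marketplace-validations/Privalyse_privalyse-cli | privalyse_scanner/exporters/html_exporter.py | _group_by_severity
-- ===== SOURCE A (Python) =====
-- from typing import Dict, List, Any
--
-- def _group_by_severity(findings: List[Dict]) -> Dict[str, List[Dict]]:
--     """Group findings by severity"""
--     grouped = {
--         'critical': [],
--         'high': [],
--         'medium': [],
--         'low': [],
--         'info': []
--     }
--
--     for finding in findings:
--         severity = finding.get('severity', 'info').lower()
--         if severity in grouped:
--             grouped[severity].append(finding)
--
--     return grouped
-- ===== SOURCE B (Python) =====
-- def _group_by_severity(findings):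
--     """Group findings by severity: one independent filtering pass per fixed severity name."""
--     return {
--         name: [f for f in findings if f.get('severity', 'info').lower() == name]
--         for name in ('critical', 'high', 'medium', 'low', 'info')
--     }
-- ===== Notes on version B (the rewrite author's own statement) =====
-- stated objective: alternative
-- what changed: Replaces the single dispatch loop that routes each finding into a pre-built five-bucket dict with a dict comprehension that builds each of the five fixed buckets by an independent filtering pass over the findings list.
import Mathlib
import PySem

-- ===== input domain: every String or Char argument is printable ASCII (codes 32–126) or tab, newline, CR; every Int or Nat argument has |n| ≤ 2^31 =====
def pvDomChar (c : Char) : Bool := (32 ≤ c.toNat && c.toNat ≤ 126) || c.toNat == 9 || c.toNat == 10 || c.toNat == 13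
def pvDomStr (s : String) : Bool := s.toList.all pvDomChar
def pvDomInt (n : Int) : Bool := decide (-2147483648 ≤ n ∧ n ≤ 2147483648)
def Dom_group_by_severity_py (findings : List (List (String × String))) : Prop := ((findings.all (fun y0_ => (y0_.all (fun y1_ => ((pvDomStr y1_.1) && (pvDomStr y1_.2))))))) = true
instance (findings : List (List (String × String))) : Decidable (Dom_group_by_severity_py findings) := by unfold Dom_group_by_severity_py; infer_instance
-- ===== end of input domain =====

-- B replaces A's single routing pass over findings (dispatch into a pre-built five-bucket
-- dict) with five independent filtering passes, one per fixed severity name ("alternative").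

-- shared helper: finding.get('severity', 'info').lower()
def pvSev (f : List (String × String)) : String :=
  PySem.Str.lower (PySem.Dict.getD (PySem.Dict.mk f) "severity" "info")

-- ===== PORT A =====
def group_by_severity_py (findings : List (List (String × String))) : List (String × List (List (String × String))) :=
  (findings.foldl
    (fun grouped finding =>
      let severity := pvSev finding
      if grouped.contains severity then
        grouped.modify severity [] (fun b => b ++ [finding])
      else grouped)
    (PySem.Dict.mk [("critical", []), ("high", []), ("medium", []), ("low", []), ("info", [])])).items

-- ===== PORT B =====
def group_by_severity_py_alt (findings : List (List (String × String))) : List (String × List (List (String × String))) :=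
  ["critical", "high", "medium", "low", "info"].map
    (fun name => (name, findings.filter (fun f => pvSev f == name)))

-- ===== PRECONDITION & SPEC =====
def Spec_group_by_severity_py (findings : List (List (String × String))) (out : List (String × List (List (String × String)))) : Prop := out = group_by_severity_py_alt findings
instance (findings : List (List (String × String))) (out : List (String × List (List (String × String)))) : Decidable (Spec_group_by_severity_py findings out) := by unfold Spec_group_by_severity_py; infer_instance

-- ===== CLAIM (what is proved, stated in full; the proofs are below) =====
def Claim_equal_group_by_severity_py : Prop := ∀ (findings : List (List (String × String))), Dom_group_by_severity_py findings → Spec_group_by_severity_py findings (group_by_severity_py findings)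

-- ===== LEMMAS AND PROOFS =====

-- invariant of A's loop: starting from the five-bucket dict with buckets a1..a5, the fold
-- appends to each bucket exactly the findings whose severity filters to that bucket's name
lemma pv_fold_inv (l : List (List (String × String)))
    (a1 a2 a3 a4 a5 : List (List (String × String))) :
    l.foldl
      (fun grouped finding =>
        let severity := pvSev finding
        if grouped.contains severity then
          grouped.modify severity [] (fun b => b ++ [finding])
        else grouped)
      (PySem.Dict.mk [("critical", a1), ("high", a2), ("medium", a3), ("low", a4), ("info", a5)]) =
    PySem.Dict.mk [("critical", a1 ++ l.filter (fun f => pvSev f == "critical")),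
                   ("high",     a2 ++ l.filter (fun f => pvSev f == "high")),
                   ("medium",   a3 ++ l.filter (fun f => pvSev f == "medium")),
                   ("low",      a4 ++ l.filter (fun f => pvSev f == "low")),
                   ("info",     a5 ++ l.filter (fun f => pvSev f == "info"))] := by
  induction l generalizing a1 a2 a3 a4 a5 with
  | nil => simp
  | cons f t ih =>
    simp only [List.foldl_cons, List.filter_cons]
    by_cases h1 : pvSev f = "critical"
    · have hcond : (PySem.Dict.mk [("critical", a1), ("high", a2), ("medium", a3), ("low", a4), ("info", a5)]).contains (pvSev f) = true := by
        simp [h1, PySem.Dict.contains]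
      have hstep : (PySem.Dict.mk [("critical", a1), ("high", a2), ("medium", a3), ("low", a4), ("info", a5)]).modify (pvSev f) [] (fun b => b ++ [f]) = PySem.Dict.mk [("critical", a1 ++ [f]), ("high", a2), ("medium", a3), ("low", a4), ("info", a5)] := by
        simp [h1, PySem.Dict.modify, PySem.Dict.insert, PySem.Dict.getD, PySem.Dict.get?, PySem.Dict.contains]
      simp only [hcond, if_true, hstep]
      rw [ih]
      simp [h1]
    ·
      by_cases h2 : pvSev f = "high"
      · have hcond : (PySem.Dict.mk [("critical", a1), ("high", a2), ("medium", a3), ("low", a4), ("info", a5)]).contains (pvSev f) = true := by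
          simp [h2, PySem.Dict.contains]
        have hstep : (PySem.Dict.mk [("critical", a1), ("high", a2), ("medium", a3), ("low", a4), ("info", a5)]).modify (pvSev f) [] (fun b => b ++ [f]) = PySem.Dict.mk [("critical", a1), ("high", a2 ++ [f]), ("medium", a3), ("low", a4), ("info", a5)] := by
          simp [h2, PySem.Dict.modify, PySem.Dict.insert, PySem.Dict.getD, PySem.Dict.get?, PySem.Dict.contains]
        simp only [hcond, if_true, hstep]
        rw [ih]
        simp [h2]
      ·
        by_cases h3 : pvSev f = "medium"
        · have hcond : (PySem.Dict.mk [("critical", a1), ("high", a2), ("medium", a3), ("low", a4), ("info", a5)]).contains (pvSev f) = true := by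
            simp [h3, PySem.Dict.contains]
          have hstep : (PySem.Dict.mk [("critical", a1), ("high", a2), ("medium", a3), ("low", a4), ("info", a5)]).modify (pvSev f) [] (fun b => b ++ [f]) = PySem.Dict.mk [("critical", a1), ("high", a2), ("medium", a3 ++ [f]), ("low", a4), ("info", a5)] := by
            simp [h3, PySem.Dict.modify, PySem.Dict.insert, PySem.Dict.getD, PySem.Dict.get?, PySem.Dict.contains]
          simp only [hcond, if_true, hstep]
          rw [ih]
          simp [h3]
        ·
          by_cases h4 : pvSev f = "low"
          · have hcond : (PySem.Dict.mk [("critical", a1), ("high", a2), ("medium", a3), ("low", a4), ("info", a5)]).contains (pvSev f) = true := by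
              simp [h4, PySem.Dict.contains]
            have hstep : (PySem.Dict.mk [("critical", a1), ("high", a2), ("medium", a3), ("low", a4), ("info", a5)]).modify (pvSev f) [] (fun b => b ++ [f]) = PySem.Dict.mk [("critical", a1), ("high", a2), ("medium", a3), ("low", a4 ++ [f]), ("info", a5)] := by
              simp [h4, PySem.Dict.modify, PySem.Dict.insert, PySem.Dict.getD, PySem.Dict.get?, PySem.Dict.contains]
            simp only [hcond, if_true, hstep]
            rw [ih]
            simp [h4]
          ·
            by_cases h5 : pvSev f = "info"
            · have hcond : (PySem.Dict.mk [("critical", a1), ("high", a2), ("medium", a3), ("low", a4), ("info", a5)]).contains (pvSev f) = true := by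
                simp [h5, PySem.Dict.contains]
              have hstep : (PySem.Dict.mk [("critical", a1), ("high", a2), ("medium", a3), ("low", a4), ("info", a5)]).modify (pvSev f) [] (fun b => b ++ [f]) = PySem.Dict.mk [("critical", a1), ("high", a2), ("medium", a3), ("low", a4), ("info", a5 ++ [f])] := by
                simp [h5, PySem.Dict.modify, PySem.Dict.insert, PySem.Dict.getD, PySem.Dict.get?, PySem.Dict.contains]
              simp only [hcond, if_true, hstep]
              rw [ih]
              simp [h5]
            · have hcond : (PySem.Dict.mk [("critical", a1), ("high", a2), ("medium", a3), ("low", a4), ("info", a5)]).contains (pvSev f) = false := by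
                simp only [PySem.Dict.contains_mk]
                simp [Ne.symm h1, Ne.symm h2, Ne.symm h3, Ne.symm h4, Ne.symm h5]
              simp only [hcond, Bool.false_eq_true, if_false]
              rw [ih]
              simp [h1, h2, h3, h4, h5]

-- ===== VERDICT (by name: the statement is the Claim_ definition above) =====
theorem group_by_severity_py_spec : Claim_equal_group_by_severity_py := by
  intro findings _
  unfold Spec_group_by_severity_py group_by_severity_py group_by_severity_py_alt
  rw [pv_fold_inv]
  rfl
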